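-- pv_equiv track=rewrite | github.com/BernardoMoschen/i2a2_agent_final_project | src/services/transport_validators.py | validate_uf_route
-- ===== SOURCE A (Python) =====
-- from typing import Dict, List, Optional
--
-- VALID_UFS = [
--     "AC", "AL", "AP", "AM", "BA", "CE", "DF", "ES", "GO", "MA",
--     "MT", "MS", "MG", "PA", "PB", "PR", "PE", "PI", "RJ", "RN",
--     "RS", "RO", "RR", "SC", "SP", "SE", "TO"
-- ]
--
-- def validate_uf(uf: Optional[str]) -> bool:
--     """Validate Brazilian state (UF) code."""
--     if not uf:
--         return True  # Skip if missing
--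
--     return uf.strip().upper() in VALID_UFS
--
-- def validate_uf_route(route_ufs: List[str]) -> bool:
--     """
--     Validate UF route for MDFe (no duplicates, valid states).
--
--     Args:
--         route_ufs: List of UF codes in route order
--
--     Returns:
--         True if route is valid
--     """
--     if not route_ufs:
--         return True  # Skip if missing
--
--     # All UFs must be valid
--     if not all(validate_uf(uf) for uf in route_ufs):
--         return False
--
--     # No duplicate UFs in route
--     if len(route_ufs) != len(set(route_ufs)):
--         return False
--
--     return True
-- ===== SOURCE B (Python) =====
-- VALID_UFS = [
--     "AC", "AL", "AP", "AM", "BA", "CE", "DF", "ES", "GO", "MA",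
--     "MT", "MS", "MG", "PA", "PB", "PR", "PE", "PI", "RJ", "RN",
--     "RS", "RO", "RR", "SC", "SP", "SE", "TO"
-- ]
--
--
-- def validate_uf_route(route_ufs):
--     # Duplicate detection by sorting: any duplicate in the list becomes an
--     # equal adjacent pair in the sorted order.
--     srt = sorted(route_ufs)
--     for a, b in zip(srt, srt[1:]):
--         if a == b:
--             return False
--     # Validity: empty strings pass; anything else must normalize into the list.
--     for uf in route_ufs:
--         if uf and uf.strip().upper() not in VALID_UFS:
--             return False
--     return True
-- ===== Notes on version B (the rewrite author's own statement) =====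
-- stated objective: alternative
-- what changed: Duplicate detection is done by sorting the route and scanning for an equal adjacent pair (instead of comparing len(route) with len(set(route))), and validity is a single explicit early-return loop inlining the normalization instead of all() over a helper; no empty-list guard is needed.
import Mathlib
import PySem

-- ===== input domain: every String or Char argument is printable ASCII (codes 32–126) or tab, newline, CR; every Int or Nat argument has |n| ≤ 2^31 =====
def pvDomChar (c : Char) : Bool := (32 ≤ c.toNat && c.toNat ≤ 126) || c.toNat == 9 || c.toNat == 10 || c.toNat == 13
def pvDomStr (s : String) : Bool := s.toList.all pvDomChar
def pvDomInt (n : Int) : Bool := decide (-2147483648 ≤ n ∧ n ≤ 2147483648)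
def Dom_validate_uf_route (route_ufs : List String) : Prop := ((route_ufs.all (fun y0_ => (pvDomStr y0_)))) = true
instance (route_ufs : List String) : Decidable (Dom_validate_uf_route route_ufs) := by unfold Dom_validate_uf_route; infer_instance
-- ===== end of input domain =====

-- B detects duplicates by sorting the route and scanning for an equal adjacent pair
-- (instead of A's len-vs-set comparison) and validates with one explicit early-return
-- loop instead of all() over a helper (objective: alternative).

-- ===== PORT A =====
def VALID_UFS : List String :=
  ["AC", "AL", "AP", "AM", "BA", "CE", "DF", "ES", "GO", "MA",
   "MT", "MS", "MG", "PA", "PB", "PR", "PE", "PI", "RJ", "RN",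
   "RS", "RO", "RR", "SC", "SP", "SE", "TO"]

-- validate_uf(uf): 'not uf' on a str is the empty-string test; 'in VALID_UFS' is list membership
def validate_uf (uf : String) : Bool :=
  if uf = "" then true
  else VALID_UFS.contains (PySem.Str.upper (PySem.Str.strip uf))

def validate_uf_route (route_ufs : List String) : Bool :=
  if route_ufs = [] then true
  else if !(route_ufs.all (fun uf => validate_uf uf)) then false
  else if (route_ufs.length : Int) ≠ PySem.Set.len (PySem.Set.ofList route_ufs) then false
  else true

-- ===== PORT B =====
-- the 'for a, b in zip(srt, srt[1:])' loop: walk adjacent pairs, true = a duplicate pair found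
def adjDup : List String → Bool
  | a :: b :: rest => if a = b then true else adjDup (b :: rest)
  | _ => false

-- the validity loop: 'if uf and uf.strip().upper() not in VALID_UFS: return False'
def validLoop : List String → Bool
  | [] => true
  | uf :: rest =>
      if uf ≠ "" && !(VALID_UFS.contains (PySem.Str.upper (PySem.Str.strip uf))) then false
      else validLoop rest

def validate_uf_route_alt (route_ufs : List String) : Bool :=
  let srt := PySem.List.sorted route_ufs (fun x => x) false
  if adjDup srt then false
  else validLoop route_ufs

-- ===== PRECONDITION & SPEC =====
def Spec_validate_uf_route (route_ufs : List String) (out : Bool) : Prop := out = validate_uf_route_alt route_ufs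
instance (route_ufs : List String) (out : Bool) : Decidable (Spec_validate_uf_route route_ufs out) := by unfold Spec_validate_uf_route; infer_instance

-- ===== CLAIM (what is proved, stated in full; the proofs are below) =====
def Claim_equal_validate_uf_route : Prop := ∀ (route_ufs : List String), Dom_validate_uf_route route_ufs → Spec_validate_uf_route route_ufs (validate_uf_route route_ufs)

-- ===== LEMMAS AND PROOFS =====

-- strict drop in length of set(xs) when xs has a duplicate
theorem ofList_length_lt_of_not_nodup (xs : List String) (h : ¬ xs.Nodup) :
    (PySem.Set.ofList xs).length < xs.length := by
  induction xs with
  | nil => exact absurd List.nodup_nil h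
  | cons x xs ih =>
    rw [PySem.Set.ofList_cons]
    by_cases hx : x ∈ xs
    · have hmem : x ∈ PySem.Set.ofList xs := (PySem.Set.mem_ofList xs x).2 hx
      have hlt : ((PySem.Set.ofList xs).filter (fun y => !y == x)).length < (PySem.Set.ofList xs).length := by
        apply List.length_filter_lt_length_iff_exists.2
        exact ⟨x, hmem, by simp⟩
      have hle := PySem.Set.length_ofList_le (xs := xs)
      simp only [PySem.Set.discard, List.length_cons]
      omega
    · have hnd : ¬ xs.Nodup := fun hnd => h (List.nodup_cons.2 ⟨hx, hnd⟩)
      have hlt := ih hnd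
      have hle : ((PySem.Set.ofList xs).filter (fun y => !y == x)).length ≤ (PySem.Set.ofList xs).length :=
        List.length_filter_le _ _
      simp only [PySem.Set.discard, List.length_cons]
      omega

theorem ofList_length_iff_nodup (xs : List String) :
    ((xs.length : Int) = PySem.Set.len (PySem.Set.ofList xs)) ↔ xs.Nodup := by
  constructor
  · intro h
    by_contra hnd
    have := ofList_length_lt_of_not_nodup xs hnd
    simp only [PySem.Set.len] at h
    omega
  · intro h
    rw [PySem.Set.ofList_eq_self_of_nodup (xs := xs) h]
    simp [PySem.Set.len]

-- on a ≤-sorted list, an equal adjacent pair exists iff the list has a duplicate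
theorem adjDup_iff (l : List String) (h : l.Pairwise (· ≤ ·)) :
    adjDup l = true ↔ ¬ l.Nodup := by
  induction l with
  | nil => simp [adjDup]
  | cons a tl ih =>
    cases tl with
    | nil => simp [adjDup]
    | cons b rest =>
      rcases List.pairwise_cons.1 h with ⟨hhead, htl⟩
      by_cases hab : a = b
      · subst hab
        simp [adjDup, List.nodup_cons]
      · have hnm : a ∉ b :: rest := by
          intro hmem
          rcases List.mem_cons.1 hmem with rfl | hmem
          · exact hab rfl
          · have hba : b ≤ a := (List.pairwise_cons.1 htl).1 a hmem
            have hab' : a ≤ b := hhead b (by simp)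
            exact hab (le_antisymm hab' hba)
        have : adjDup (a :: b :: rest) = adjDup (b :: rest) := by
          simp [adjDup, hab]
        rw [this, ih htl]
        constructor
        · intro hd hnd; exact hd (List.nodup_cons.1 hnd).2
        · intro hd hnd; exact hd (List.nodup_cons.2 ⟨hnm, hnd⟩)

-- B's validity loop computes A's all(validate_uf) pass
theorem validLoop_eq_all (l : List String) :
    validLoop l = l.all (fun uf => validate_uf uf) := by
  induction l with
  | nil => simp [validLoop]
  | cons uf rest ih =>
    by_cases h0 : uf = ""
    · simp [validLoop, validate_uf, h0, ih]
    · by_cases hc : VALID_UFS.contains (PySem.Str.upper (PySem.Str.strip uf))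
      · simp [validLoop, validate_uf, h0, hc, ih]
      · simp [validLoop, validate_uf, h0, hc, ih]

-- ===== VERDICT (by name: the statement is the Claim_ definition above) =====
theorem validate_uf_route_spec : Claim_equal_validate_uf_route := by
  intro route_ufs _
  unfold Spec_validate_uf_route
  rw [Bool.eq_iff_iff]
  unfold validate_uf_route validate_uf_route_alt
  have hsortP : (PySem.List.sorted route_ufs (fun x => x) false).Pairwise (· ≤ ·) := by
    simpa using PySem.List.sorted_pairwise (xs := route_ufs) (key := fun x => x)
  have hperm : (PySem.List.sorted route_ufs (fun x => x) false).Perm route_ufs :=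
    PySem.List.sorted_perm (xs := route_ufs) (key := fun x => x) (rev := false)
  have hdup : adjDup (PySem.List.sorted route_ufs (fun x => x) false) = true ↔ ¬ route_ufs.Nodup := by
    rw [adjDup_iff _ hsortP, hperm.nodup_iff]
  rw [validLoop_eq_all]
  by_cases hnil : route_ufs = []
  · subst hnil
    simp [adjDup, PySem.List.sorted]
  · rw [if_neg hnil]
    cases hall : route_ufs.all (fun uf => validate_uf uf) with
    | false =>
      simp only [Bool.not_false, if_true]
      constructor
      · intro h; exact absurd h (by simp)
      · intro h
        split at h
        · exact absurd h (by simp)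
        · exact absurd h (by simp [hall])
    | true =>
      simp only [Bool.not_true, Bool.false_eq_true, if_false]
      by_cases hnd : route_ufs.Nodup
      · rw [if_neg (by simpa using (ofList_length_iff_nodup route_ufs).2 hnd)]
        have : adjDup (PySem.List.sorted route_ufs (fun x => x) false) = false := by
          rw [Bool.eq_false_iff, Ne, hdup]; exact fun h => h hnd
        simp [this, hall]
      · rw [if_pos (by
            simp only [Ne]
            rw [ofList_length_iff_nodup]
            exact hnd)]
        have : adjDup (PySem.List.sorted route_ufs (fun x => x) false) = true := hdup.2 hnd
        simp [this]
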